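-- pv_equiv track=rewrite | github.com/akb89/pyfn | pyfn/marshalling/marshallers/semafor.py | _get_token_num
-- ===== SOURCE A (Python) =====
-- def _get_token_num(index, text):
--     token_num = -1
--     prev_char_is_whitespace = True
--     for char_index, char in enumerate(text):
--         if char.isspace():
--             prev_char_is_whitespace = True
--             continue
--         if prev_char_is_whitespace:
--             token_num += 1
--         prev_char_is_whitespace = False
--         if char_index == index:
--             return token_num
--     raise Exception('Could not determine token number for char index '
--                     '{} in sentence \'{}\''
--                     .format(index, text))
-- ===== SOURCE B (Python) =====
-- def _get_token_num(index, text):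
--     if index < 0 or index >= len(text) or text[index].isspace():
--         raise Exception('Could not determine token number for char index '
--                         '{} in sentence \'{}\''
--                         .format(index, text))
--     prefix = text[:index + 1]
--     starts = sum(1 for prev, char in zip(' ' + prefix, prefix)
--                  if prev.isspace() and not char.isspace())
--     return starts - 1
-- ===== Notes on version B (the rewrite author's own statement) =====
-- stated objective: alternative
-- what changed: Replaced A's stateful early-return scan (running token counter + prev-whitespace flag) with an up-front guard for the raising cases followed by a stateless count of token-start boundaries in text[:index+1] via a shifted zip.
import Mathlib
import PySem

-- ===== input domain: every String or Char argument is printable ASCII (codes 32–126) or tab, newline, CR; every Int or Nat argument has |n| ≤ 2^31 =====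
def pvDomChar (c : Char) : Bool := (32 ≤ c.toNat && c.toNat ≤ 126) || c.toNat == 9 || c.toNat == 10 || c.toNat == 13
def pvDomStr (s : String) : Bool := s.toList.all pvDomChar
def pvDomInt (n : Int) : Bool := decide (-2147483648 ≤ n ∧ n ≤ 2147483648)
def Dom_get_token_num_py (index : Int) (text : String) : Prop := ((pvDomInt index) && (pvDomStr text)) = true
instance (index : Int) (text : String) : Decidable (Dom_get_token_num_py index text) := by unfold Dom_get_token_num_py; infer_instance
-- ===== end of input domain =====

-- B replaces A's stateful early-return scan by a guard (raise cases up front) plus a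
-- count of token starts in the prefix text[:index+1] via a shifted zip; same cost, different decomposition.
-- A raises on out-of-range or whitespace indices; those inputs are outside Pre_ (B raises identically there).

-- ===== PORT A =====
-- loop of A: enumerate with running token_num and prev_char_is_whitespace; 0 on the raise path (outside Pre_)
def pvAGo (index : Int) (token_num : Int) (prev : Bool) (k : Nat) : List Char → Int
  | [] => 0
  | c :: rest =>
    if PySem.Chars.isspace c then pvAGo index token_num true (k + 1) rest
    else
      let tn := if prev then token_num + 1 else token_num
      if (k : Int) = index then tn else pvAGo index tn false (k + 1) rest

def get_token_num_py (index : Int) (text : String) : Int :=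
  pvAGo index (-1) true 0 text.toList

-- ===== PORT B =====
-- guard (the raise: 0 there, outside Pre_); then count token starts in text[:index+1]
-- via zip(' ' + prefix, prefix).  text[index] is read with getD: the guard ensures 0 ≤ index < len,
-- where Python indexing is plain list indexing; text[:index+1] with index ≥ 0 is List.take (index+1).
def get_token_num_py_alt (index : Int) (text : String) : Int :=
  let l := text.toList
  if index < 0 ∨ (l.length : Int) ≤ index ∨ PySem.Chars.isspace (l.getD index.toNat ' ') then 0
  else
    let pre := l.take (index.toNat + 1)
    let starts : Int :=
      (((' ' :: pre).zip pre).filter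
        (fun pc => PySem.Chars.isspace pc.1 && !PySem.Chars.isspace pc.2)).length
    starts - 1

-- ===== PRECONDITION & SPEC =====
-- A raises exactly when index is negative, ≥ len(text), or points at a whitespace char; Pre_ excludes those.
def Pre_get_token_num_py (index : Int) (text : String) : Prop :=
  0 ≤ index ∧ index < (text.toList.length : Int) ∧
    PySem.Chars.isspace (text.toList.getD index.toNat ' ') = false
instance (index : Int) (text : String) : Decidable (Pre_get_token_num_py index text) := by
  unfold Pre_get_token_num_py; infer_instance

def pvWitness_get_token_num_py : Int × String := (4, "ab cd e")

def Spec_get_token_num_py (index : Int) (text : String) (out : Int) : Prop := out = get_token_num_py_alt index text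
instance (index : Int) (text : String) (out : Int) : Decidable (Spec_get_token_num_py index text out) := by unfold Spec_get_token_num_py; infer_instance

-- ===== CLAIM (what is proved, stated in full; the proofs are below) =====
def Claim_equal_get_token_num_py : Prop := ∀ (index : Int) (text : String), Dom_get_token_num_py index text → Pre_get_token_num_py index text → Spec_get_token_num_py index text (get_token_num_py index text)

-- ===== LEMMAS AND PROOFS =====

-- token-start count of a char list, given whether the (virtual) previous char is whitespace
def pvCnt (prev : Bool) : List Char → Int
  | [] => 0
  | c :: rest =>
    (if prev && !PySem.Chars.isspace c then 1 else 0) + pvCnt (PySem.Chars.isspace c) rest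

lemma pvZip_eq_cnt (l : List Char) (p : Char) :
    ((((p :: l).zip l).filter
      (fun pc => PySem.Chars.isspace pc.1 && !PySem.Chars.isspace pc.2)).length : Int)
      = pvCnt (PySem.Chars.isspace p) l := by
  induction l generalizing p with
  | nil => simp [pvCnt]
  | cons c rest ih =>
    simp only [List.zip_cons_cons, List.filter_cons, pvCnt]
    by_cases h : (PySem.Chars.isspace p && !PySem.Chars.isspace c) = true
    · simp only [h, if_true, List.length_cons, ← ih c]; push_cast; ring
    · simp only [h, if_false, Bool.false_eq_true, ← ih c]; simp

lemma pvAGo_eq_cnt (l : List Char) (j k : Nat) (index tn : Int) (prev : Bool)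
    (hidx : index = (k : Int) + j) (hlt : j < l.length)
    (hns : PySem.Chars.isspace (l.getD j ' ') = false) :
    pvAGo index tn prev k l = tn + pvCnt prev (l.take (j + 1)) := by
  induction l generalizing j k tn prev with
  | nil => simp at hlt
  | cons c rest ih =>
    by_cases hc : PySem.Chars.isspace c = true
    · -- whitespace char: j ≠ 0
      cases j with
      | zero => simp [hc] at hns
      | succ j' =>
        have := ih j' (k + 1) tn true (by push_cast; omega)
          (by simpa using Nat.lt_of_succ_lt_succ hlt) (by simpa using hns)
        simp only [pvAGo, hc, if_true, List.take_succ_cons, pvCnt]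
        rw [this]
        simp [hc]
    · simp only [pvAGo, hc, if_false]
      cases j with
      | zero =>
        have hk : (k : Int) = index := by omega
        simp only [hk, if_true, List.take_succ_cons, List.take_zero, pvCnt, hc]
        cases prev <;> simp
      | succ j' =>
        have hk : ¬ ((k : Int) = index) := by omega
        have := ih j' (k + 1) (if prev then tn + 1 else tn) false (by push_cast; omega)
          (by simpa using Nat.lt_of_succ_lt_succ hlt) (by simpa using hns)
        simp only [hk, if_false]
        rw [this]
        simp only [List.take_succ_cons, pvCnt, hc]
        cases prev <;> simp <;> ring

-- ===== VERDICT (by name: the statement is the Claim_ definition above) =====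
theorem get_token_num_py_spec : Claim_equal_get_token_num_py := by
  intro index text _ hpre
  obtain ⟨h0, hlt, hns⟩ := hpre
  unfold Spec_get_token_num_py get_token_num_py get_token_num_py_alt
  set l := text.toList with hl
  have hguard : ¬ (index < 0 ∨ (l.length : Int) ≤ index ∨
      PySem.Chars.isspace (l.getD index.toNat ' ') = true) := by
    push_neg
    exact ⟨by omega, by omega, by simpa [List.getD] using hns⟩
  simp only [hguard, if_false]
  have hj : index = ((0 : Nat) : Int) + (index.toNat : Int) := by omega
  have hjlt : index.toNat < l.length := by omega
  rw [pvAGo_eq_cnt l index.toNat 0 index (-1) true hj hjlt hns,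
      pvZip_eq_cnt (l.take (index.toNat + 1)) ' ']
  have hsp : PySem.Chars.isspace ' ' = true := by decide
  rw [hsp]
  ring
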